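-- pv_equiv track=rewrite | github.com/BouweCeunen/certbot-kubernetes-secrets-aws | src/aws_function.py | get_domains_hosted_zone
-- ===== SOURCE A (Python) =====
-- def get_domains_hosted_zone(hosted_zones, domain):
--   domains = domain.split('.')
--   hosted_zone = None
--   for zone in hosted_zones:
--     parsed_zone = zone['Name'].rstrip('.').split('.')
--     parsed_domain = domain.split('.')
--     while len(parsed_domain) >= 1 and len(parsed_zone) >= 1:
--       if parsed_domain[-1] != parsed_zone[-1]:
--         break
--       parsed_domain.pop(-1)
--       parsed_zone.pop(-1)
--     if len(parsed_zone) == 0 and len(parsed_domain) <= len(domains):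
--       domains = parsed_domain
--       hosted_zone = zone
--   return (hosted_zone, domains)
-- ===== SOURCE B (Python) =====
-- def get_domains_hosted_zone(hosted_zones, domain):
--   # Index every zone by its normalized label tuple (last occurrence wins),
--   # then look up the longest suffix of the domain's labels in one pass.
--   index = {}
--   for zone in hosted_zones:
--     index[tuple(zone['Name'].rstrip('.').split('.'))] = zone
--   labels = domain.split('.')
--   n = len(labels)
--   for k in range(n, 0, -1):
--     zone = index.get(tuple(labels[n - k:]))
--     if zone is not None:
--       return (zone, labels[:n - k])
--   return (None, labels)
-- ===== Notes on version B (the rewrite author's own statement) =====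
-- stated objective: idiomatic
-- what changed: Replaces A's per-zone label-popping while loop with running best by a one-pass dict index from each zone's normalized label tuple (last occurrence wins) followed by a longest-suffix-first lookup over the domain's labels.
import Mathlib
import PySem

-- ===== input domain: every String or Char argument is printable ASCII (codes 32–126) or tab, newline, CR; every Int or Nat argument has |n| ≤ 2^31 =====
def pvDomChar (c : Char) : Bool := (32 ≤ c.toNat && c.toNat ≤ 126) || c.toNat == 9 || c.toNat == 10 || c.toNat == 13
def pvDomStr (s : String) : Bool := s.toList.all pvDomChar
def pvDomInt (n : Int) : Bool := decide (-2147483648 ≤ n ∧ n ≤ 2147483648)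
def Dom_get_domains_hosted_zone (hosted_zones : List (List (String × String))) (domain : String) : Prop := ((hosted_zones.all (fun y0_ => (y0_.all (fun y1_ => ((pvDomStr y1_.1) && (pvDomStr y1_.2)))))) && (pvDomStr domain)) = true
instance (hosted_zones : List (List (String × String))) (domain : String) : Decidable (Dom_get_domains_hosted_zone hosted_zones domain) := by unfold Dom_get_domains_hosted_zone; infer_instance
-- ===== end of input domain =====

-- B replaces A's per-zone suffix-popping loop and running minimum by a one-pass
-- dict index on normalized zone label lists plus a longest-suffix-first lookup
-- (objective: idiomatic/alternative; same observable result, return value only).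

-- ===== PORT A =====

-- s.split('.') — exact: separator is nonempty, so PySem.Str.split? is `some`
def pvSplitDot (s : String) : List String := (PySem.Str.split? s ".").getD []

-- s.rstrip('.') — ported by hand (PySem has no chars-argument rstrip): drop
-- trailing '.' characters; exact for every string
def pvRstripDot (s : String) : String := String.ofList ((s.toList.reverse.dropWhile (· == '.')).reverse)

-- zone['Name'].rstrip('.').split('.') — zone['Name'] is a first-match lookup;
-- under Pre_ the key is present, so getD with default "" is exact
def pvZoneKey (zone : List (String × String)) : List String :=
  pvSplitDot (pvRstripDot (PySem.Dict.getD (PySem.Dict.mk zone) "Name" ""))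

-- the while loop of A: pop equal last labels from both lists until mismatch or exhaustion
def pvPopCommon (pd pz : List String) : List String × List String :=
  if h : 1 ≤ pd.length ∧ 1 ≤ pz.length then
    if pd.getLastD "" ≠ pz.getLastD "" then (pd, pz)
    else pvPopCommon pd.dropLast pz.dropLast
  else (pd, pz)
  termination_by pd.length
  decreasing_by simp only [List.length_dropLast]; omega

def get_domains_hosted_zone (hosted_zones : List (List (String × String))) (domain : String) : (Option (List (String × String))) × List String :=
  hosted_zones.foldl
    (fun st zone =>
      let parsed_zone := pvZoneKey zone
      let parsed_domain := pvSplitDot domain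
      let pc := pvPopCommon parsed_domain parsed_zone
      if pc.2.length = 0 ∧ pc.1.length ≤ st.2.length then (some zone, pc.1) else st)
    (none, pvSplitDot domain)

-- ===== PORT B =====

-- the final lookup loop of B: for k in range(n, 0, -1), first hit wins
def pvProbe (d : PySem.Dict (List String) (List (String × String))) (dl : List String) :
    Nat → (Option (List (String × String))) × List String
  | 0 => (none, dl)
  | k+1 =>
    match PySem.Dict.get? d (dl.drop (dl.length - (k+1))) with
    | some z => (some z, dl.take (dl.length - (k+1)))
    | none => pvProbe d dl k

def get_domains_hosted_zone_alt (hosted_zones : List (List (String × String))) (domain : String) : (Option (List (String × String))) × List String :=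
  let index := hosted_zones.foldl (fun d z => PySem.Dict.insert d (pvZoneKey z) z)
    (PySem.Dict.empty : PySem.Dict (List String) (List (String × String)))
  let labels := pvSplitDot domain
  pvProbe index labels labels.length

-- ===== PRECONDITION & SPEC =====
-- Pre_ excludes exactly the inputs where the Python A raises (KeyError: a zone
-- dict without the key 'Name'); B raises there too.
def Pre_get_domains_hosted_zone (hosted_zones : List (List (String × String))) (domain : String) : Prop :=
  ∀ zone ∈ hosted_zones, (PySem.Dict.mk zone).contains "Name" = true
instance (hosted_zones : List (List (String × String))) (domain : String) : Decidable (Pre_get_domains_hosted_zone hosted_zones domain) := by unfold Pre_get_domains_hosted_zone; infer_instance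

def pvWitness_get_domains_hosted_zone : (List (List (String × String))) × String :=
  ([[("Name", "com.")], [("Name", "b.com")]], "a.b.com")

def Spec_get_domains_hosted_zone (hosted_zones : List (List (String × String))) (domain : String) (out : (Option (List (String × String))) × List String) : Prop := out = get_domains_hosted_zone_alt hosted_zones domain
instance (hosted_zones : List (List (String × String))) (domain : String) (out : (Option (List (String × String))) × List String) : Decidable (Spec_get_domains_hosted_zone hosted_zones domain out) := by unfold Spec_get_domains_hosted_zone; infer_instance

-- ===== CLAIM (what is proved, stated in full; the proofs are below) =====
def Claim_equal_get_domains_hosted_zone : Prop := ∀ (hosted_zones : List (List (String × String))) (domain : String), Dom_get_domains_hosted_zone hosted_zones domain → Pre_get_domains_hosted_zone hosted_zones domain → Spec_get_domains_hosted_zone hosted_zones domain (get_domains_hosted_zone hosted_zones domain)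

-- ===== LEMMAS AND PROOFS =====

theorem pvSplitGo_ne_nil (sep : List Char) : ∀ (fuel : Nat) (l cur : List Char) (acc : List (List Char)),
    PySem.Chars.splitOn.go sep fuel l cur acc ≠ [] := by
  intro fuel
  induction fuel with
  | zero => intro l cur acc; simp [PySem.Chars.splitOn.go]
  | succ f ih =>
    intro l cur acc
    cases l with
    | nil => simp [PySem.Chars.splitOn.go]
    | cons c rest =>
      rw [PySem.Chars.splitOn.go]
      split
      · exact ih _ _ _
      · exact ih _ _ _

theorem pvSplitDot_ne_nil (s : String) : pvSplitDot s ≠ [] := by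
  simp [pvSplitDot, PySem.Str.split?, PySem.Chars.split?, PySem.Chars.splitOn]
  intro h
  exact absurd (congrArg (List.map String.ofList) h) (by simpa using pvSplitGo_ne_nil ['.'] _ _ _ _)

-- the while loop on a zone key that IS a suffix of the domain labels
theorem pvPopCommon_suffix : ∀ (pd pz : List String), pz <:+ pd →
    pvPopCommon pd pz = (pd.take (pd.length - pz.length), []) := by
  intro pd pz
  fun_induction pvPopCommon pd pz with
  | case1 pd pz h hne =>
    intro hsuf
    exfalso
    obtain ⟨c, rfl⟩ := hsuf
    have hz : pz ≠ [] := by intro hz; rw [hz] at h; simp at h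
    apply hne
    rw [List.getLastD_eq_getLast?, List.getLastD_eq_getLast?, List.getLast?_append,
      List.getLast?_eq_some_getLast hz]
    simp
  | case2 pd pz h hne ih =>
    intro hsuf
    obtain ⟨c, rfl⟩ := hsuf
    have hz : pz ≠ [] := by intro hz; rw [hz] at h; simp at h
    have hd : (c ++ pz).dropLast = c ++ pz.dropLast := List.dropLast_append_of_ne_nil hz
    rw [hd] at ih ⊢
    rw [ih ⟨c, rfl⟩]
    have h3 : (c ++ pz.dropLast).length - pz.dropLast.length = c.length := by simp
    have h4 : (c ++ pz).length - pz.length = c.length := by simp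
    rw [h3, h4]
    rw [List.take_append_of_le_length (le_refl _), List.take_append_of_le_length (le_refl _)]
  | case3 pd pz h =>
    intro hsuf
    have hor : pd.length < 1 ∨ pz.length < 1 := by omega
    rcases hor with hpd | hpz
    · have hpd' : pd = [] := by cases pd <;> simp_all
      subst hpd'
      have hz : pz = [] := List.eq_nil_of_suffix_nil hsuf
      subst hz; simp
    · have hz : pz = [] := by cases pz <;> simp_all
      subst hz; simp

-- the while loop on a zone key that is NOT a suffix: some zone label remains
theorem pvPopCommon_not_suffix : ∀ (pd pz : List String), ¬ pz <:+ pd →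
    (pvPopCommon pd pz).2 ≠ [] := by
  intro pd pz
  fun_induction pvPopCommon pd pz with
  | case1 pd pz h hne =>
    intro _ hz
    simp only at hz
    rw [hz] at h; simp at h
  | case2 pd pz h hne ih =>
    intro hsuf
    apply ih
    intro hsub
    apply hsuf
    have hpd : pd ≠ [] := by intro hx; rw [hx] at h; simp at h
    have hpz : pz ≠ [] := by intro hx; rw [hx] at h; simp at h
    have heq : pd.getLast hpd = pz.getLast hpz := by
      have h2 : pd.getLastD "" = pz.getLastD "" := not_not.mp hne
      rw [List.getLastD_eq_getLast?, List.getLastD_eq_getLast?,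
        List.getLast?_eq_some_getLast hpd, List.getLast?_eq_some_getLast hpz] at h2
      simp only [Option.getD_some] at h2
      exact h2
    obtain ⟨c, hc⟩ := hsub
    refine ⟨c, ?_⟩
    conv_lhs => rw [← List.dropLast_concat_getLast hpz]
    rw [← heq, ← List.append_assoc, hc, List.dropLast_concat_getLast hpd]
  | case3 pd pz h =>
    intro hsuf hz
    simp only at hz
    rw [hz] at hsuf
    exact hsuf List.nil_suffix

-- invariant tying A's running state to B's index dict
def pvInv (d : PySem.Dict (List String) (List (String × String))) (dl : List String)
    (st : (Option (List (String × String))) × List String) : Prop :=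
  match st.1 with
  | none => st.2 = dl ∧ ∀ k, 1 ≤ k → k ≤ dl.length → d.get? (dl.drop (dl.length - k)) = none
  | some z => ∃ j, 1 ≤ j ∧ j ≤ dl.length ∧ st.2 = dl.take (dl.length - j) ∧
      d.get? (dl.drop (dl.length - j)) = some z ∧
      ∀ k, j < k → k ≤ dl.length → d.get? (dl.drop (dl.length - k)) = none

theorem pvProbe_none (d : PySem.Dict (List String) (List (String × String))) (dl : List String) :
    ∀ m, (∀ k, 1 ≤ k → k ≤ m → d.get? (dl.drop (dl.length - k)) = none) →
    pvProbe d dl m = (none, dl) := by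
  intro m
  induction m with
  | zero => intro _; simp [pvProbe]
  | succ m ih =>
    intro h
    rw [pvProbe, h (m+1) (by omega) (le_refl _)]
    exact ih (fun k h1 h2 => h k h1 (by omega))

theorem pvProbe_some (d : PySem.Dict (List String) (List (String × String))) (dl : List String)
    (z : List (String × String)) (j : Nat) :
    ∀ m, 1 ≤ j → j ≤ m →
    d.get? (dl.drop (dl.length - j)) = some z →
    (∀ k, j < k → k ≤ m → d.get? (dl.drop (dl.length - k)) = none) →
    pvProbe d dl m = (some z, dl.take (dl.length - j)) := by
  intro m
  induction m with
  | zero => intro h1 h2 _ _; omega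
  | succ m ih =>
    intro h1 h2 hj hnone
    by_cases hjm : j = m + 1
    · subst hjm
      rw [pvProbe, hj]
    · rw [pvProbe, hnone (m+1) (by omega) (le_refl _)]
      exact ih h1 (by omega) hj (fun k hk1 hk2 => hnone k hk1 (by omega))

theorem pvProbe_of_inv (d : PySem.Dict (List String) (List (String × String))) (dl : List String)
    (st : (Option (List (String × String))) × List String) (h : pvInv d dl st) :
    pvProbe d dl dl.length = st := by
  obtain ⟨b, r⟩ := st
  cases b with
  | none =>
    obtain ⟨hr, hnone⟩ := h
    simp only at hr
    subst hr
    exact pvProbe_none d r r.length hnone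
  | some z =>
    obtain ⟨j, h1, h2, hr, hj, hnone⟩ := h
    simp only at hr
    subst hr
    exact pvProbe_some d dl z j dl.length h1 h2 hj hnone

-- one step: inserting a zone into the index preserves the invariant against A's update
theorem pvInv_step (d : PySem.Dict (List String) (List (String × String))) (dl : List String)
    (st : (Option (List (String × String))) × List String) (z : List (String × String))
    (key : List String) (hkey : key ≠ []) (h : pvInv d dl st) :
    pvInv (d.insert key z) dl
      (if (pvPopCommon dl key).2.length = 0 ∧ (pvPopCommon dl key).1.length ≤ st.2.length
       then (some z, (pvPopCommon dl key).1) else st) := by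
  by_cases hsuf : key <:+ dl
  · -- key is a suffix of dl of length kz ≥ 1
    have hkz1 : 1 ≤ key.length := by cases key <;> simp_all
    have hkzn : key.length ≤ dl.length := hsuf.length_le
    have hdropkey : dl.drop (dl.length - key.length) = key :=
      (List.suffix_iff_eq_drop.mp hsuf).symm
    have hpc := pvPopCommon_suffix dl key hsuf
    rw [hpc]
    have hlen_take : (dl.take (dl.length - key.length)).length = dl.length - key.length := by
      simp
    -- distinct probe keys have distinct lengths
    have hne_len : ∀ k, k ≤ dl.length → k ≠ key.length → dl.drop (dl.length - k) ≠ key := by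
      intro k hk hne heq
      apply hne
      have hlen : (dl.drop (dl.length - k)).length = k := by rw [List.length_drop]; omega
      rw [heq] at hlen
      omega
    obtain ⟨b, r⟩ := st
    cases b with
    | none =>
      obtain ⟨hr, hnone⟩ := h
      subst hr
      simp only [hlen_take]
      rw [if_pos ⟨rfl, by simp⟩]
      refine ⟨key.length, hkz1, hkzn, rfl, ?_, ?_⟩
      · rw [PySem.Dict.get?_insert, if_pos hdropkey]
      · intro k hk1 hk2
        rw [PySem.Dict.get?_insert, if_neg (hne_len k hk2 (by omega))]
        exact hnone k (by omega) hk2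
    | some z0 =>
      obtain ⟨j, hj1, hj2, hr, hjget, hnone⟩ := h
      by_cases hcond : j ≤ key.length
      · -- accepted: new best is this zone
        rw [if_pos ⟨rfl, by rw [hr]; simp; omega⟩]
        refine ⟨key.length, hkz1, hkzn, rfl, ?_, ?_⟩
        · rw [PySem.Dict.get?_insert, if_pos hdropkey]
        · intro k hk1 hk2
          rw [PySem.Dict.get?_insert, if_neg (hne_len k hk2 (by omega))]
          exact hnone k (by omega) hk2
      · -- rejected: strictly shorter match than the current best
        rw [if_neg (by rw [hr]; simp; omega)]
        refine ⟨j, hj1, hj2, hr, ?_, ?_⟩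
        · rw [PySem.Dict.get?_insert, if_neg (hne_len j hj2 (by omega))]
          exact hjget
        · intro k hk1 hk2
          rw [PySem.Dict.get?_insert, if_neg (hne_len k hk2 (by omega))]
          exact hnone k hk1 hk2
  · -- key is not a suffix: A rejects, and the new index entry is never probed
    have hpc := pvPopCommon_not_suffix dl key hsuf
    rw [if_neg (by intro hc; exact hpc (List.length_eq_zero_iff.mp hc.1))]
    have hne : ∀ k, dl.drop (dl.length - k) ≠ key := by
      intro k heq
      exact hsuf (heq ▸ List.drop_suffix _ _)
    obtain ⟨b, r⟩ := st
    cases b with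
    | none =>
      obtain ⟨hr, hnone⟩ := h
      exact ⟨hr, fun k h1 h2 => by
        rw [PySem.Dict.get?_insert, if_neg (hne k)]; exact hnone k h1 h2⟩
    | some z0 =>
      obtain ⟨j, hj1, hj2, hr, hjget, hnone⟩ := h
      refine ⟨j, hj1, hj2, hr, ?_, ?_⟩
      · rw [PySem.Dict.get?_insert, if_neg (hne j)]; exact hjget
      · intro k h1 h2
        rw [PySem.Dict.get?_insert, if_neg (hne k)]; exact hnone k h1 h2

theorem pvInv_foldl (dl : List String) :
    ∀ (zs : List (List (String × String))) (d : PySem.Dict (List String) (List (String × String)))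
      (st : (Option (List (String × String))) × List String), pvInv d dl st →
    pvInv (zs.foldl (fun d z => PySem.Dict.insert d (pvZoneKey z) z) d) dl
      (zs.foldl (fun st zone =>
        if (pvPopCommon dl (pvZoneKey zone)).2.length = 0 ∧
           (pvPopCommon dl (pvZoneKey zone)).1.length ≤ st.2.length
        then (some zone, (pvPopCommon dl (pvZoneKey zone)).1) else st) st) := by
  intro zs
  induction zs with
  | nil => intro d st h; exact h
  | cons z zs ih =>
    intro d st h
    exact ih _ _ (pvInv_step d dl st z (pvZoneKey z) (pvSplitDot_ne_nil _) h)

-- ===== VERDICT (by name: the statement is the Claim_ definition above) =====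
theorem get_domains_hosted_zone_spec : Claim_equal_get_domains_hosted_zone := by
  intro hosted_zones domain _ _
  unfold Spec_get_domains_hosted_zone get_domains_hosted_zone get_domains_hosted_zone_alt
  have hinv : pvInv (PySem.Dict.empty : PySem.Dict (List String) (List (String × String)))
      (pvSplitDot domain) (none, pvSplitDot domain) := by
    refine ⟨rfl, ?_⟩
    intro k _ _
    rfl
  have := pvInv_foldl (pvSplitDot domain) hosted_zones PySem.Dict.empty
    (none, pvSplitDot domain) hinv
  exact (pvProbe_of_inv _ _ _ this).symm
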